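-- pv_equiv track=rewrite | github.com/Stanley-P23/Typing_Speeder | TypingSpeeder.py | check_spelling
-- ===== SOURCE A (Python) =====
-- def check_spelling(entry_text,
--                    reference_text):
--     result = []
--     for index, sign in enumerate(entry_text):
--         if index < len(reference_text) and sign == reference_text[index]:
--             result.append(1)
--         else:
--             result.append(0)
--
--     return result
-- ===== SOURCE B (Python) =====
-- def check_spelling(entry_text,
--                    reference_text):
--     n, m = len(entry_text), len(reference_text)
--     # build the result back-to-front: the reversed tail of zeros first,
--     # then walk the overlapping region from the end, reversing at the close
--     out = [0] * (n - m) if n > m else []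
--     i = min(n, m)
--     while i > 0:
--         i -= 1
--         out.append(1 if entry_text[i] == reference_text[i] else 0)
--     out.reverse()
--     return out
-- ===== Notes on version B (the rewrite author's own statement) =====
-- stated objective: alternative
-- what changed: Builds the result back-to-front: first the reversed zero tail for entry positions past the reference, then a descending walk over the overlapping region appending match flags, with one final reverse; no per-index bounds check inside the loop.
import Mathlib
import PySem

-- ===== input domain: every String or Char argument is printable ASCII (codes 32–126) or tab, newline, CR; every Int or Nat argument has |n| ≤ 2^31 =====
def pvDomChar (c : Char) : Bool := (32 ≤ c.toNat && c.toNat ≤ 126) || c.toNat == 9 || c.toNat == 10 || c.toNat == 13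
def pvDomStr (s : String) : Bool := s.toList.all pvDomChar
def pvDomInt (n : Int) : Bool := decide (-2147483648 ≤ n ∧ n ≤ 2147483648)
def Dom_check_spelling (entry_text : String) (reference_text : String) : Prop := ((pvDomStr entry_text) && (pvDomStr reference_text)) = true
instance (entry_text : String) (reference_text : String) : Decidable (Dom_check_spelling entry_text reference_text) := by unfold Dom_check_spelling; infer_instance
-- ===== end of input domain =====

-- B builds the result back-to-front (reversed zero tail, then a descending walk over the
-- overlap appending match flags, one final reverse) instead of A's forward indexed loop
-- with a per-index bounds check (objective: alternative, same cost).
-- ===== PORT A =====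
def check_spelling (entry_text : String) (reference_text : String) : List Int :=
  (PySem.List.enumerate entry_text.toList).foldl
    (fun result p =>
      if p.1 < (PySem.Str.len reference_text : Int) ∧ PySem.Str.pyGet? reference_text p.1 = some p.2
      then result ++ [(1 : Int)]
      else result ++ [(0 : Int)])
    []

-- ===== PORT B =====
-- the `while i > 0: i -= 1; out.append(...)` loop of Source B, as structural recursion on i
def csAltGo (el rl : List Char) : Nat → List Int → List Int
  | 0, out => out
  | i + 1, out => csAltGo el rl i (out ++ [if el[i]? == rl[i]? then (1 : Int) else 0])

def check_spelling_alt (entry_text : String) (reference_text : String) : List Int :=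
  let el := entry_text.toList
  let rl := reference_text.toList
  let n := el.length
  let m := rl.length
  let out0 : List Int := if n > m then List.replicate (n - m) 0 else []
  (csAltGo el rl (min n m) out0).reverse

-- ===== PRECONDITION & SPEC =====
def Spec_check_spelling (entry_text : String) (reference_text : String) (out : List Int) : Prop := out = check_spelling_alt entry_text reference_text
instance (entry_text : String) (reference_text : String) (out : List Int) : Decidable (Spec_check_spelling entry_text reference_text out) := by unfold Spec_check_spelling; infer_instance

-- ===== CLAIM (what is proved, stated in full; the proofs are below) =====
def Claim_equal_check_spelling : Prop := ∀ (entry_text : String) (reference_text : String), Dom_check_spelling entry_text reference_text → Spec_check_spelling entry_text reference_text (check_spelling entry_text reference_text)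

-- ===== LEMMAS AND PROOFS =====

-- A's loop yields the pairwise flags followed by the zero tail
lemma cs_fold (rl : List Char) (l : List Char) (s : Nat) (acc : List Int) :
    (PySem.List.enumerate l (s : Int)).foldl
      (fun result p =>
        if p.1 < (rl.length : Int) ∧ PySem.List.pyGet? rl p.1 = some p.2
        then result ++ [(1 : Int)]
        else result ++ [(0 : Int)])
      acc
    = acc ++ (List.zipWith (fun a b => if a == b then (1 : Int) else 0) l (rl.drop s)
        ++ List.replicate (l.length - (rl.length - s)) (0 : Int)) := by
  induction l generalizing s acc with
  | nil => simp
  | cons c l ih =>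
    rw [PySem.List.enumerate_cons]
    simp only [List.foldl_cons]
    have hc : ((s : Int) + 1) = (((s + 1 : Nat)) : Int) := by push_cast; ring
    have hg : PySem.List.pyGet? rl (s : Int) = rl[s]? := PySem.List.pyGet?_natCast rl s
    by_cases h : s < rl.length
    · have hd : rl.drop s = rl[s] :: rl.drop (s + 1) := List.drop_eq_getElem_cons h
      have hg2 : PySem.List.pyGet? rl (s : Int) = some rl[s] := by
        rw [hg, List.getElem?_eq_getElem h]
      have hcount : l.length - (rl.length - (s + 1)) = (c :: l).length - (rl.length - s) := by
        simp only [List.length_cons]; omega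
      by_cases he : rl[s] = c
      · have hcond : ((s : Int) < (rl.length : Int) ∧
            PySem.List.pyGet? rl (s : Int) = some c) := by
          exact ⟨by exact_mod_cast h, by rw [hg2, he]⟩
        rw [if_pos hcond, hc, ih, hd]
        simp [he, hcount]
      · have hcond : ¬ ((s : Int) < (rl.length : Int) ∧
            PySem.List.pyGet? rl (s : Int) = some c) := by
          rintro ⟨-, h2⟩
          rw [hg2] at h2
          exact he (Option.some.injEq _ _ ▸ h2)
        rw [if_neg hcond, hc, ih, hd]
        have hb : (c == rl[s]) = false :=
          beq_eq_false_iff_ne.mpr (fun h' => he h'.symm)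
        rw [hcount]
        simp only [List.zipWith_cons_cons, hb, Bool.false_eq_true, if_false,
          List.append_assoc, List.cons_append, List.nil_append]
    · have hd : rl.drop s = [] := List.drop_eq_nil_of_le (by omega)
      have hd2 : rl.drop (s + 1) = [] := List.drop_eq_nil_of_le (by omega)
      have hcond : ¬ ((s : Int) < (rl.length : Int) ∧
          PySem.List.pyGet? rl (s : Int) = some c) := by
        rintro ⟨h1, -⟩; exact h (by exact_mod_cast h1)
      rw [if_neg hcond, hc, ih]
      have hcount : l.length - (rl.length - (s + 1)) = l.length := by omega
      have hcount2 : (c :: l).length - (rl.length - s) = l.length + 1 := by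
        simp only [List.length_cons]; omega
      rw [hd, hd2, hcount, hcount2]
      simp [List.replicate_succ]

-- B's descending loop appends the reversed flags of the first k positions
lemma csAltGo_eq (el rl : List Char) (k : Nat) (out : List Int) :
    csAltGo el rl k out
      = out ++ ((List.range k).map
          (fun i => if el[i]? == rl[i]? then (1 : Int) else 0)).reverse := by
  induction k generalizing out with
  | zero => simp [csAltGo]
  | succ k ih =>
    rw [csAltGo, ih, List.range_succ]
    simp

-- the forward flag map over the overlap is the zipWith of flags
lemma map_range_eq_zipWith (el rl : List Char) :
    (List.range (min el.length rl.length)).map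
        (fun i => if el[i]? == rl[i]? then (1 : Int) else 0)
      = List.zipWith (fun a b => if a == b then (1 : Int) else 0) el rl := by
  apply List.ext_getElem
  · simp
  · intro i h1 h2
    have hi : i < min el.length rl.length := by simpa using h1
    have he : i < el.length := lt_of_lt_of_le hi (Nat.min_le_left _ _)
    have hr : i < rl.length := lt_of_lt_of_le hi (Nat.min_le_right _ _)
    simp [List.getElem?_eq_getElem he, List.getElem?_eq_getElem hr]

-- ===== VERDICT (by name: the statement is the Claim_ definition above) =====
theorem check_spelling_spec : Claim_equal_check_spelling := by
  intro e r _
  unfold Spec_check_spelling check_spelling check_spelling_alt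
  have hA := cs_fold r.toList e.toList 0 []
  simp only [List.drop_zero, Nat.sub_zero, List.nil_append] at hA
  dsimp only
  rw [csAltGo_eq, map_range_eq_zipWith]
  simp only [PySem.Str.len, PySem.Str.pyGet?, PySem.Chars.pyGet?_eq_listPyGet?]
  refine hA.trans ?_
  by_cases h : e.toList.length > r.toList.length
  · rw [if_pos h]
    simp [List.reverse_append, List.reverse_replicate]
  · rw [if_neg h]
    have h0 : e.toList.length - r.toList.length = 0 := by omega
    simp [List.reverse_reverse]
    exact h0
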